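-- pv_equiv track=rewrite | github.com/JoshDeiner/prototype | unified_assistant.py | _is_confirmation
-- ===== SOURCE A (Python) =====
-- def _is_confirmation(user_input):
--     """Check if user input is a confirmation.
--
--     Args:
--         user_input: User text input
--
--     Returns:
--         bool: True if input is a confirmation, False otherwise
--     """
--     # Convert to lowercase
--     input_lower = user_input.lower().strip()
--
--     # Common confirmation phrases
--     confirmations = [
--         "yes", "sure", "ok", "okay", "y", "yep", "yeah", "confirm",
--         "do it", "execute", "run it", "proceed", "go", "go ahead"
--     ]
--
--     # Check if input matches any confirmation phrase
--     return any(input_lower == confirm or input_lower.startswith(confirm + " ")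
--               for confirm in confirmations)
-- ===== SOURCE B (Python) =====
-- _SINGLE = {"yes", "sure", "ok", "okay", "y", "yep", "yeah", "confirm",
--            "execute", "proceed", "go"}
-- _DOUBLE = {"do it", "run it", "go ahead"}
--
--
-- def _is_confirmation(user_input):
--     """Check if user input is a confirmation (token-indexed lookup)."""
--     tokens = user_input.lower().strip().split(" ")
--     if tokens[0] in _SINGLE:
--         return True
--     return len(tokens) >= 2 and tokens[0] + " " + tokens[1] in _DOUBLE
-- ===== Notes on version B (the rewrite author's own statement) =====
-- stated objective: idiomatic
-- what changed: B tokenizes the lowered/stripped input once by splitting on single spaces and answers by set membership of the first token (single-word phrases) or of the first two tokens joined (two-word phrases), instead of A's linear scan testing equality-or-space-prefix against each of the 14 phrases.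
import Mathlib
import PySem

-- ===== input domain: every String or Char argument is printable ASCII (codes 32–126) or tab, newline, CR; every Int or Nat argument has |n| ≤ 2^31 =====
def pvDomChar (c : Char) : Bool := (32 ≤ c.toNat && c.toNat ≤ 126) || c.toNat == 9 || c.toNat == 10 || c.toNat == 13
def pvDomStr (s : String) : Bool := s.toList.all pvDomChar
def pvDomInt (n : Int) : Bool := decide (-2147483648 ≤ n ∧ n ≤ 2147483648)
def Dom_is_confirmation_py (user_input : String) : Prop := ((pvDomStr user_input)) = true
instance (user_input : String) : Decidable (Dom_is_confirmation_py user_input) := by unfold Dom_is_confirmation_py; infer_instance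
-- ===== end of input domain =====

-- B replaces A's 14-way scan (equality-or-prefix per phrase) by one tokenization plus
-- set lookups indexed by word count; objective: idiomatic/alternative, same behaviour.

-- ===== PORT A =====
def pvConfirmations : List String :=
  ["yes", "sure", "ok", "okay", "y", "yep", "yeah", "confirm",
   "do it", "execute", "run it", "proceed", "go", "go ahead"]

def is_confirmation_py (user_input : String) : Bool :=
  let input_lower := PySem.Str.strip (PySem.Str.lower user_input)
  pvConfirmations.any (fun confirm =>
    input_lower == confirm || PySem.Str.startswith input_lower (confirm ++ " "))

-- ===== PORT B =====
def pvSingleConfirms : PySem.Set String :=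
  PySem.Set.ofList ["yes", "sure", "ok", "okay", "y", "yep", "yeah", "confirm",
                    "execute", "proceed", "go"]

def pvDoubleConfirms : PySem.Set String :=
  PySem.Set.ofList ["do it", "run it", "go ahead"]

def is_confirmation_py_alt (user_input : String) : Bool :=
  -- tokens = user_input.lower().strip().split(" ")  (split with an explicit separator,
  -- as PySem.Str.split?; a nonempty separator never yields none / an empty token list)
  let tokens :=
    (PySem.Chars.splitOn (PySem.Str.strip (PySem.Str.lower user_input)).toList [' ']).map
      String.ofList
  match tokens with
  | [] => false
  | t0 :: rest =>
    if PySem.Set.contains pvSingleConfirms t0 then true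
    else
      match rest with
      | [] => false
      | t1 :: _ => PySem.Set.contains pvDoubleConfirms (t0 ++ " " ++ t1)

-- ===== PRECONDITION & SPEC =====
def Spec_is_confirmation_py (user_input : String) (out : Bool) : Prop := out = is_confirmation_py_alt user_input
instance (user_input : String) (out : Bool) : Decidable (Spec_is_confirmation_py user_input out) := by unfold Spec_is_confirmation_py; infer_instance

-- ===== CLAIM (what is proved, stated in full; the proofs are below) =====
def Claim_equal_is_confirmation_py : Prop := ∀ (user_input : String), Dom_is_confirmation_py user_input → Spec_is_confirmation_py user_input (is_confirmation_py user_input)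

-- ===== LEMMAS AND PROOFS =====

-- the predicate "not a space", used by the token decomposition
def pvNS (c : Char) : Bool := !(c == ' ')

-- simple structural description of splitting on a single space
def pvSp : List Char → List (List Char)
  | [] => [[]]
  | c :: r =>
    if c = ' ' then [] :: pvSp r
    else match pvSp r with
      | [] => [[c]]
      | t :: ts => (c :: t) :: ts

def pvRest (l : List Char) : List (List Char) :=
  match l.dropWhile pvNS with
  | [] => []
  | _ :: r => pvSp r

theorem pvSp_spec (l : List Char) : pvSp l = l.takeWhile pvNS :: pvRest l := by
  induction l with
  | nil => simp [pvSp, pvRest]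
  | cons c r ih =>
    by_cases hc : c = ' '
    · subst hc
      simp [pvSp, pvRest, List.takeWhile_cons, List.dropWhile_cons, pvNS]
    · have hns : pvNS c = true := by simp [pvNS, hc]
      simp only [pvSp, if_neg hc, ih, pvRest, List.takeWhile_cons, List.dropWhile_cons, hns]
      simp

theorem pv_tw_app (w l : List Char) (h : ∀ c ∈ w, pvNS c = true) :
    (w ++ l).takeWhile pvNS = w ++ l.takeWhile pvNS := by
  induction w with
  | nil => simp
  | cons c w ih =>
    simp only [List.cons_append, List.takeWhile_cons]
    rw [h c (by simp)]
    simp [ih (fun c hc => h c (by simp [hc]))]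

theorem pv_dw_app (w l : List Char) (h : ∀ c ∈ w, pvNS c = true) :
    (w ++ l).dropWhile pvNS = l.dropWhile pvNS := by
  induction w with
  | nil => simp
  | cons c w ih =>
    simp only [List.cons_append, List.dropWhile_cons]
    rw [h c (by simp)]
    simp [ih (fun c hc => h c (by simp [hc]))]

theorem pv_dw_head (l : List Char) (c : Char) (r : List Char)
    (h : l.dropWhile pvNS = c :: r) : c = ' ' := by
  induction l with
  | nil => simp at h
  | cons a l ih =>
    rw [List.dropWhile_cons] at h
    by_cases ha : pvNS a = true
    · rw [if_pos ha] at h; exact ih h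
    · rw [if_neg ha] at h
      cases h
      simp [pvNS] at ha
      exact ha

-- splitOn.go on a single space, related to pvSp
theorem pv_splitOn_go (fuel : Nat) : ∀ (l cur : List Char) (acc : List (List Char)),
    l.length < fuel →
    PySem.Chars.splitOn.go [' '] fuel l cur acc =
      acc.reverse ++ (cur.reverse ++ l.takeWhile pvNS) :: pvRest l := by
  induction fuel with
  | zero => intro l cur acc h; omega
  | succ fuel ih =>
    intro l cur acc h
    match l with
    | [] =>
      rw [PySem.Chars.splitOn.go]
      simp [pvRest]
      omega
    | c :: rest =>
      rw [PySem.Chars.splitOn.go]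
      simp only [List.length_cons] at h
      by_cases hc : c = ' '
      · subst hc
        rw [if_pos (by simp [List.isPrefixOf])]
        have hdrop : List.drop [' '].length (' ' :: rest) = rest := by simp
        rw [hdrop, ih rest [] (cur.reverse :: acc) (by omega)]
        simp [pvRest, List.takeWhile_cons, List.dropWhile_cons, pvNS, pvSp_spec rest]
      · have hns : pvNS c = true := by simp [pvNS, hc]
        rw [if_neg (by simp [List.isPrefixOf]; exact fun hh => hc hh.symm)]
        rw [ih rest (c :: cur) acc (by omega)]
        simp [pvRest, List.takeWhile_cons, List.dropWhile_cons, hns]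

theorem pv_splitOn_eq_sp (l : List Char) :
    PySem.Chars.splitOn l [' '] = l.takeWhile pvNS :: pvRest l := by
  rw [PySem.Chars.splitOn, pv_splitOn_go (l.length + 1) l [] [] (by omega)]
  simp

-- single-word confirmation: "equal or has it as a space-terminated prefix" = "first token equals it"
theorem pv_single_iff (cs w : List Char) (hwb : w.all pvNS = true) :
    (cs = w ∨ (w ++ [' ']) <+: cs) ↔ cs.takeWhile pvNS = w := by
  have hw : ∀ c ∈ w, pvNS c = true := fun c hc => List.all_eq_true.mp hwb c hc
  constructor
  · rintro (rfl | ⟨t, rfl⟩)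
    · exact List.takeWhile_eq_self_iff.mpr hw
    · rw [List.append_assoc, pv_tw_app _ _ hw]
      simp [List.takeWhile_cons, pvNS]
  · intro h
    have hsplit : cs = w ++ cs.dropWhile pvNS := by
      conv_lhs => rw [← List.takeWhile_append_dropWhile (p := pvNS) (l := cs)]
      rw [h]
    cases hd : cs.dropWhile pvNS with
    | nil => left; rw [hsplit, hd]; simp
    | cons c r =>
      right
      have := pv_dw_head cs c r hd
      subst this
      exact ⟨r, by rw [hsplit, hd]; simp⟩

-- two-word confirmation
theorem pv_double_iff (cs w1 w2 : List Char)
    (h1b : w1.all pvNS = true) (h2b : w2.all pvNS = true) :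
    (cs = w1 ++ ' ' :: w2 ∨ (w1 ++ ' ' :: (w2 ++ [' '])) <+: cs) ↔
      (cs.takeWhile pvNS = w1 ∧
       ∃ r, cs.dropWhile pvNS = ' ' :: r ∧ r.takeWhile pvNS = w2) := by
  have h1 : ∀ c ∈ w1, pvNS c = true := fun c hc => List.all_eq_true.mp h1b c hc
  have h2 : ∀ c ∈ w2, pvNS c = true := fun c hc => List.all_eq_true.mp h2b c hc
  constructor
  · rintro (rfl | ⟨t, rfl⟩)
    · refine ⟨?_, w2, ?_, List.takeWhile_eq_self_iff.mpr h2⟩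
      · rw [pv_tw_app _ _ h1]; simp [List.takeWhile_cons, pvNS]
      · rw [pv_dw_app _ _ h1]; simp [List.dropWhile_cons, pvNS]
    · constructor
      · simp only [List.append_assoc, List.cons_append, List.singleton_append]
        rw [pv_tw_app _ _ h1]
        simp [List.takeWhile_cons, pvNS]
      · refine ⟨w2 ++ ' ' :: t, ?_, ?_⟩
        · simp only [List.append_assoc, List.cons_append, List.singleton_append]
          rw [pv_dw_app _ _ h1]
          simp [List.dropWhile_cons, pvNS]
        · rw [pv_tw_app _ _ h2]
          simp [pvNS]
  · rintro ⟨ht, r, hd, hr⟩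
    have hsplit : cs = w1 ++ ' ' :: r := by
      conv_lhs => rw [← List.takeWhile_append_dropWhile (p := pvNS) (l := cs)]
      rw [ht, hd]
    have hrsplit : r = w2 ++ r.dropWhile pvNS := by
      conv_lhs => rw [← List.takeWhile_append_dropWhile (p := pvNS) (l := r)]
      rw [hr]
    cases hrd : r.dropWhile pvNS with
    | nil => left; rw [hsplit, hrsplit, hrd]; simp
    | cons c u =>
      right
      have := pv_dw_head r c u hrd
      subst this
      exact ⟨u, by rw [hsplit, hrsplit, hrd]; simp⟩

-- splitting a "w1 ++ ' ' :: w2" shape at its FIRST space is unique when w1 is space-free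
theorem pv_join_inj (a b x y : List Char)
    (ha : ∀ c ∈ a, pvNS c = true) (hxb : x.all pvNS = true) :
    (a ++ ' ' :: b = x ++ ' ' :: y) ↔ (a = x ∧ b = y) := by
  have hx : ∀ c ∈ x, pvNS c = true := fun c hc => List.all_eq_true.mp hxb c hc
  constructor
  · intro h
    have h1 : (a ++ ' ' :: b).takeWhile pvNS = a := by
      rw [pv_tw_app _ _ ha]; simp [List.takeWhile_cons, pvNS]
    have h2 : (x ++ ' ' :: y).takeWhile pvNS = x := by
      rw [pv_tw_app _ _ hx]; simp [List.takeWhile_cons, pvNS]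
    have hax : a = x := by rw [← h1, ← h2, h]
    subst hax
    exact ⟨rfl, by simpa using h⟩
  · rintro ⟨rfl, rfl⟩; rfl

-- bridges between String equality/membership and the list side
theorem pv_str_eq (s t : String) : (s = t) ↔ s.toList = t.toList :=
  ⟨fun h => by rw [h], fun h => by have := congrArg String.ofList h; simpa using this⟩

theorem pv_ofList_eq (l : List Char) (s : String) : (String.ofList l = s) ↔ l = s.toList := by
  rw [pv_str_eq]; simp

theorem pv_ite (b x : Bool) : ((if b = true then true else x) = true) ↔ (b = true ∨ x = true) := by
  cases b <;> simp

theorem pv_contains_ofList (L : List String) (x : String) :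
    PySem.Set.contains (PySem.Set.ofList L) x = true ↔ x ∈ L := by
  simp [PySem.Set.contains, PySem.Set.mem_ofList]

-- ===== VERDICT (by name: the statement is the Claim_ definition above) =====
set_option maxRecDepth 8192 in
set_option maxHeartbeats 2000000 in
theorem is_confirmation_py_spec : Claim_equal_is_confirmation_py := by
  intro user_input _
  unfold Spec_is_confirmation_py is_confirmation_py is_confirmation_py_alt
  rw [Bool.eq_iff_iff]
  simp only [pvConfirmations, List.any_cons, List.any_nil, Bool.or_eq_true, beq_iff_eq,
    PySem.Str.startswith_eq, String.toList_append, pv_splitOn_eq_sp, List.map_cons,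
    pv_str_eq, PySem.Chars.startswith_iff, Bool.false_eq_true, or_false]
  generalize (PySem.Str.strip (PySem.Str.lower user_input)).toList = cs
  have hsp : " ".toList = [' '] := by decide
  have hdoit : "do it".toList = "do".toList ++ ' ' :: "it".toList := by decide
  have hrunit : "run it".toList = "run".toList ++ ' ' :: "it".toList := by decide
  have hgoahead : "go ahead".toList = "go".toList ++ ' ' :: "ahead".toList := by decide
  simp only [hsp, hdoit, hrunit, hgoahead, List.append_assoc, List.cons_append]
  rw [pv_single_iff cs "yes".toList (by decide), pv_single_iff cs "sure".toList (by decide),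
    pv_single_iff cs "ok".toList (by decide), pv_single_iff cs "okay".toList (by decide),
    pv_single_iff cs "y".toList (by decide), pv_single_iff cs "yep".toList (by decide),
    pv_single_iff cs "yeah".toList (by decide), pv_single_iff cs "confirm".toList (by decide),
    pv_single_iff cs "execute".toList (by decide), pv_single_iff cs "proceed".toList (by decide),
    pv_single_iff cs "go".toList (by decide),
    pv_double_iff cs "do".toList "it".toList (by decide) (by decide),
    pv_double_iff cs "run".toList "it".toList (by decide) (by decide),
    pv_double_iff cs "go".toList "ahead".toList (by decide) (by decide)]
  rw [pv_ite]
  simp only [pvSingleConfirms, pvDoubleConfirms]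
  rw [pv_contains_ofList]
  simp only [List.mem_cons, List.not_mem_nil, or_false, pv_ofList_eq]
  cases hd : List.dropWhile pvNS cs with
  | nil =>
    simp only [pvRest, hd, List.map_nil]
    simp only [hd, List.cons_ne_nil, reduceCtorEq, false_and, exists_false, and_false, or_false]
    tauto
  | cons c r =>
    have hc := pv_dw_head cs c r hd
    subst hc
    have hrest : pvRest cs = pvSp r := by simp only [pvRest, hd]
    rw [hrest, pvSp_spec, List.map_cons]
    rw [pv_contains_ofList]
    simp only [List.mem_cons, List.not_mem_nil, or_false, pv_str_eq, String.toList_append,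
      String.toList_ofList, hdoit, hrunit, hgoahead, hsp, List.append_assoc, List.cons_append,
      List.singleton_append]
    rw [pv_join_inj _ _ _ _ (fun c hc => List.mem_takeWhile_imp hc) (by decide),
        pv_join_inj _ _ _ _ (fun c hc => List.mem_takeWhile_imp hc) (by decide),
        pv_join_inj _ _ _ _ (fun c hc => List.mem_takeWhile_imp hc) (by decide)]
    simp only [hd, List.cons.injEq, true_and, exists_eq_left']
    generalize List.takeWhile pvNS cs = t0
    generalize List.takeWhile pvNS r = t1
    generalize "yes".toList = a01
    generalize "sure".toList = a02
    generalize "ok".toList = a03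
    generalize "okay".toList = a04
    generalize "y".toList = a05
    generalize "yep".toList = a06
    generalize "yeah".toList = a07
    generalize "confirm".toList = a08
    generalize "execute".toList = a09
    generalize "proceed".toList = a10
    generalize "go".toList = a11
    generalize "do".toList = a12
    generalize "it".toList = a13
    generalize "run".toList = a14
    generalize "ahead".toList = a15
    tauto
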